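-- pv_equiv track=rewrite | github.com/jjoshua2/arc_agi | dupes/multi_group-017/train_only/902.py | check_horizontal_painted_right
-- ===== SOURCE A (Python) =====
-- def check_horizontal_painted_right(grid):
--     rows = len(grid)
--     cols = len(grid[0])
--     n_half = cols // 2
--     mismatches = []
--     for cc in range(n_half):
--         right_c = cols - 1 - cc
--         for r in range(rows):
--             if grid[r][cc] != grid[r][right_c]:
--                 mismatches.append((r, right_c))
--     if not mismatches:
--         return None
--     colors = set(grid[p[0]][p[1]] for p in mismatches)
--     if len(colors) != 1:
--         return None
--     min_r = min(p[0] for p in mismatches)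
--     max_r = max(p[0] for p in mismatches)
--     min_c = min(p[1] for p in mismatches)
--     max_c = max(p[1] for p in mismatches)
--     h = max_r - min_r + 1
--     w = max_c - min_c + 1
--     if len(mismatches) != h * w:
--         return None
--     left_min_c = cols - 1 - max_c
--     output = []
--     for i in range(h):
--         r = min_r + i
--         row = [grid[r][left_min_c + j] for j in range(w)]
--         row = row[::-1]  # mirror reverse
--         output.append(row)
--     return output
-- ===== SOURCE B (Python) =====
-- def check_horizontal_painted_right(grid):
--     # Column-grouped geometric check: group mismatch rows per right-half column and
--     # verify the rectangle by explicit range equality instead of bounding-box counting.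
--     rows = len(grid)
--     cols = len(grid[0])
--     half = cols // 2
--     hit_cols = []
--     col_rows = []
--     for c in range(cols - half, cols):
--         rs = [r for r in range(rows) if grid[r][cols - 1 - c] != grid[r][c]]
--         if rs:
--             hit_cols.append(c)
--             col_rows.append(rs)
--     if not hit_cols:
--         return None
--     c0 = hit_cols[0]
--     first = grid[col_rows[0][0]][c0]
--     if any(grid[r][c] != first for c, rs in zip(hit_cols, col_rows) for r in rs):
--         return None
--     if hit_cols != list(range(c0, hit_cols[-1] + 1)):
--         return None
--     rs0 = col_rows[0]
--     if rs0 != list(range(rs0[0], rs0[-1] + 1)):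
--         return None
--     if any(rs != rs0 for rs in col_rows):
--         return None
--     return [[grid[r][cols - 1 - c] for c in range(c0, hit_cols[-1] + 1)] for r in rs0]
-- ===== Notes on version B (the rewrite author's own statement) =====
-- stated objective: alternative
-- what changed: B groups mismatches per right-half column (a list of mismatch rows for each column) and verifies the rectangle geometrically - hit columns equal a contiguous range, the first column's row list equals a contiguous range, and all columns share that row list - instead of A's flat (row,col) mismatch pair list with bounding-box min/max and the count == h*w arithmetic; the output is built by direct mirrored indexing grid[r][cols-1-c] rather than slicing the left block and reversing each row. (constant-factor win: no per-mismatch tuple list, no set build, no four extra generator passes)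
import Mathlib
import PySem

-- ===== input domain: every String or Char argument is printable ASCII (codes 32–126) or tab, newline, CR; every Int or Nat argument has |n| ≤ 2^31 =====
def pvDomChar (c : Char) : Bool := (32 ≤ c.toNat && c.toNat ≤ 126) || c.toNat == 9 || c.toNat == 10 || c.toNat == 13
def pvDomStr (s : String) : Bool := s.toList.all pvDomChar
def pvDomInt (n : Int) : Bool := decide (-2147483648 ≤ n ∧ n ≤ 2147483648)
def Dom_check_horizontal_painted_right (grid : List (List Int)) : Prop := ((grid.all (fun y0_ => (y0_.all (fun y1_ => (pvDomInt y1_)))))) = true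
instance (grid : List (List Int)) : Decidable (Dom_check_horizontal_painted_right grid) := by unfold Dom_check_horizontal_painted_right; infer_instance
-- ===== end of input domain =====

-- B re-decomposes A column-wise: mismatch rows grouped per right-half column, rectangle
-- verified by explicit range equality instead of bounding-box min/max plus count == h*w.

-- grid[r][c]: all indices reached by either Python are in range on Pre_, so getD is exact there
def pvGrid (grid : List (List Int)) (r c : Nat) : Int := (grid.getD r []).getD c 0

-- ===== PORT A =====
def check_horizontal_painted_right (grid : List (List Int)) : Option (List (List Int)) :=
  let rows := grid.length
  let cols := (grid.getD 0 []).length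
  let nHalf := cols / 2
  let mismatches : List (Nat × Nat) :=
    (List.range nHalf).foldl (fun acc cc =>
      (List.range rows).foldl (fun acc2 r =>
        if pvGrid grid r cc != pvGrid grid r (cols - 1 - cc)
        then acc2 ++ [(r, cols - 1 - cc)] else acc2) acc) []
  if mismatches.isEmpty then none else
  let colors : PySem.Set Int := PySem.Set.ofList (mismatches.map (fun p => pvGrid grid p.1 p.2))
  if colors.length ≠ 1 then none else
  let minR := ((mismatches.map Prod.fst).min?).getD 0
  let maxR := ((mismatches.map Prod.fst).max?).getD 0
  let minC := ((mismatches.map Prod.snd).min?).getD 0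
  let maxC := ((mismatches.map Prod.snd).max?).getD 0
  let h := maxR - minR + 1
  let w := maxC - minC + 1
  if mismatches.length ≠ h * w then none else
  let leftMinC := cols - 1 - maxC
  some ((List.range h).map (fun i =>
    ((List.range w).map (fun j => pvGrid grid (minR + i) (leftMinC + j))).reverse))

-- ===== PORT B =====
def check_horizontal_painted_right_alt (grid : List (List Int)) : Option (List (List Int)) :=
  let rows := grid.length
  let cols := (grid.getD 0 []).length
  let half := cols / 2
  let acc := (List.range' (cols - half) half).foldl
    (fun (acc : List Nat × List (List Nat)) c =>
      let rs := (List.range rows).filter (fun r => pvGrid grid r (cols - 1 - c) != pvGrid grid r c)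
      if rs.isEmpty then acc else (acc.1 ++ [c], acc.2 ++ [rs]))
    ([], [])
  let hit := acc.1
  let colRows := acc.2
  if hit.isEmpty then none else
  let c0 := hit.headD 0
  let first := pvGrid grid ((colRows.headD []).headD 0) c0
  if (hit.zip colRows).any (fun p => p.2.any (fun r => pvGrid grid r p.1 != first)) then none
  else if hit ≠ List.range' c0 (hit.getLastD 0 + 1 - c0) then none
  else
    let rs0 := colRows.headD []
    if rs0 ≠ List.range' (rs0.headD 0) (rs0.getLastD 0 + 1 - rs0.headD 0) then none
    else if colRows.any (fun rs => rs != rs0) then none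
    else some (rs0.map (fun r =>
      (List.range' c0 (hit.getLastD 0 + 1 - c0)).map (fun c => pvGrid grid r (cols - 1 - c))))

-- ===== PRECONDITION & SPEC =====
-- Pre_ excludes exactly the inputs where Python A raises IndexError: the empty grid
-- (grid[0]), and grids with a row shorter than len(grid[0]) when columns are compared.
def Pre_check_horizontal_painted_right (grid : List (List Int)) : Prop :=
  grid ≠ [] ∧ ((grid.headD []).length / 2 = 0 ∨ ∀ row ∈ grid, (grid.headD []).length ≤ row.length)
instance (grid : List (List Int)) : Decidable (Pre_check_horizontal_painted_right grid) := by
  unfold Pre_check_horizontal_painted_right; infer_instance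

def pvWitness_check_horizontal_painted_right : List (List Int) := [[1, 2]]

def Spec_check_horizontal_painted_right (grid : List (List Int)) (out : Option (List (List Int))) : Prop := out = check_horizontal_painted_right_alt grid
instance (grid : List (List Int)) (out : Option (List (List Int))) : Decidable (Spec_check_horizontal_painted_right grid out) := by unfold Spec_check_horizontal_painted_right; infer_instance

-- ===== CLAIM (what is proved, stated in full; the proofs are below) =====
def Claim_equal_check_horizontal_painted_right : Prop := ∀ (grid : List (List Int)), Dom_check_horizontal_painted_right grid → Pre_check_horizontal_painted_right grid → Spec_check_horizontal_painted_right grid (check_horizontal_painted_right grid)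

-- ===== LEMMAS AND PROOFS =====

-- abbreviations for the shared geometry of the two programs
def gcols (g : List (List Int)) : Nat := (g.getD 0 []).length
def ghalf (g : List (List Int)) : Nat := gcols g / 2
-- B's per-column mismatch row list
def misB (g : List (List Int)) (c : Nat) : List Nat :=
  (List.range g.length).filter (fun r => pvGrid g r (gcols g - 1 - c) != pvGrid g r c)
-- the scanned right-half columns, ascending
def Cl (g : List (List Int)) : List Nat := List.range' (gcols g - ghalf g) (ghalf g)
def hitL (g : List (List Int)) : List Nat := (Cl g).filter (fun c => !(misB g c).isEmpty)
-- A's mismatch pair list, reorganised as a flatMap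
def M (g : List (List Int)) : List (Nat × Nat) :=
  (List.range (ghalf g)).flatMap (fun cc => (misB g (gcols g - 1 - cc)).map (fun r => (r, gcols g - 1 - cc)))

def Amr (g : List (List Int)) : Nat := (((M g).map Prod.fst).min?).getD 0
def AMr (g : List (List Int)) : Nat := (((M g).map Prod.fst).max?).getD 0
def Amc (g : List (List Int)) : Nat := (((M g).map Prod.snd).min?).getD 0
def AMc (g : List (List Int)) : Nat := (((M g).map Prod.snd).max?).getD 0
def Ah (g : List (List Int)) : Nat := AMr g - Amr g + 1
def Aw (g : List (List Int)) : Nat := AMc g - Amc g + 1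

theorem A_mism (g : List (List Int)) :
    (List.range ((g.getD 0 []).length / 2)).foldl (fun acc cc =>
      (List.range g.length).foldl (fun acc2 r =>
        if pvGrid g r cc != pvGrid g r ((g.getD 0 []).length - 1 - cc)
        then acc2 ++ [(r, (g.getD 0 []).length - 1 - cc)] else acc2) acc) [] = M g := by
  have hcong : ∀ (acc : List (Nat × Nat)) (cc : Nat), cc ∈ List.range ((g.getD 0 []).length / 2) →
      (List.range g.length).foldl (fun acc2 r =>
        if pvGrid g r cc != pvGrid g r ((g.getD 0 []).length - 1 - cc)
        then acc2 ++ [(r, (g.getD 0 []).length - 1 - cc)] else acc2) acc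
      = acc ++ (misB g ((g.getD 0 []).length - 1 - cc)).map (fun r => (r, (g.getD 0 []).length - 1 - cc)) := by
    intro acc cc hcc
    rw [PySem.List.foldl_append_if]
    congr 1
    show _ = (misB g ((g.getD 0 []).length - 1 - cc)).map _
    rw [List.mem_range] at hcc
    unfold misB gcols
    rw [show (g.getD 0 []).length - 1 - ((g.getD 0 []).length - 1 - cc) = cc by omega]
  rw [PySem.List.foldl_congr_mem _ _
        (fun acc cc => acc ++ (misB g ((g.getD 0 []).length - 1 - cc)).map
          (fun r => (r, (g.getD 0 []).length - 1 - cc))) _ hcong,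
      PySem.List.foldl_append_eq_flatMap]
  rfl

theorem B_acc_gen (g : List (List Int)) (l : List Nat) (h0 : List Nat) (r0 : List (List Nat)) :
    l.foldl
      (fun (acc : List Nat × List (List Nat)) c =>
        if (misB g c).isEmpty then acc else (acc.1 ++ [c], acc.2 ++ [misB g c]))
      (h0, r0)
    = (h0 ++ l.filter (fun c => !(misB g c).isEmpty),
       r0 ++ (l.filter (fun c => !(misB g c).isEmpty)).map (misB g)) := by
  induction l generalizing h0 r0 with
  | nil => simp
  | cons c t ih =>
    simp only [List.foldl_cons, List.filter_cons]
    by_cases hc : (misB g c).isEmpty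
    · rw [if_pos hc, ih]; simp [hc]
    · rw [if_neg hc, ih]; simp [hc, List.append_assoc]

theorem B_acc (g : List (List Int)) :
    (List.range' ((g.getD 0 []).length - (g.getD 0 []).length / 2) ((g.getD 0 []).length / 2)).foldl
      (fun (acc : List Nat × List (List Nat)) c =>
        if ((List.range g.length).filter (fun r => pvGrid g r ((g.getD 0 []).length - 1 - c) != pvGrid g r c)).isEmpty
        then acc
        else (acc.1 ++ [c], acc.2 ++ [(List.range g.length).filter (fun r => pvGrid g r ((g.getD 0 []).length - 1 - c) != pvGrid g r c)]))
      ([], []) = (hitL g, (hitL g).map (misB g)) := by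
  have := B_acc_gen g (List.range' ((g.getD 0 []).length - (g.getD 0 []).length / 2) ((g.getD 0 []).length / 2)) [] []
  simp only [List.nil_append] at this
  exact this

theorem mem_M (g : List (List Int)) (p : Nat × Nat) :
    p ∈ M g ↔ (p.2 ∈ Cl g ∧ p.1 ∈ misB g p.2) := by
  unfold M Cl ghalf
  simp only [List.mem_flatMap, List.mem_range, List.mem_map, List.mem_range'_1]
  constructor
  · rintro ⟨cc, hcc, r, hr, rfl⟩
    refine ⟨⟨by omega, by omega⟩, hr⟩
  · rintro ⟨⟨h1, h2⟩, h3⟩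
    refine ⟨gcols g - 1 - p.2, by omega, p.1, ?_, ?_⟩
    · rwa [show gcols g - 1 - (gcols g - 1 - p.2) = p.2 by omega]
    · rw [show gcols g - 1 - (gcols g - 1 - p.2) = p.2 by omega]

theorem mem_hitL (g : List (List Int)) (c : Nat) :
    c ∈ hitL g ↔ (c ∈ Cl g ∧ misB g c ≠ []) := by
  simp [hitL, List.mem_filter]

theorem pairwise_lt_range'' (s n : Nat) : (List.range' s n).Pairwise (· < ·) := by
  rw [List.range'_eq_map_range]
  exact List.Pairwise.map _ (fun a b h => by omega) List.pairwise_lt_range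

theorem pairwise_misB (g : List (List Int)) (c : Nat) : (misB g c).Pairwise (· < ·) :=
  List.Pairwise.filter _ List.pairwise_lt_range

theorem pairwise_hitL (g : List (List Int)) : (hitL g).Pairwise (· < ·) :=
  List.Pairwise.filter _ (pairwise_lt_range'' _ _)

theorem nodup_of_pairwise_lt (l : List Nat) (h : l.Pairwise (· < ·)) : l.Nodup :=
  h.imp (fun hlt => Nat.ne_of_lt hlt)

theorem eq_range'_of_subset_len (l : List Nat) (a n : Nat) (hp : l.Pairwise (· < ·))
    (hsub : ∀ x ∈ l, x ∈ List.range' a n) (hlen : l.length = n) : l = List.range' a n := by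
  have hperm : List.Perm l (List.range' a n) :=
    ((nodup_of_pairwise_lt l hp).subperm hsub).perm_of_length_le
      (by rw [List.length_range', hlen])
  exact List.Perm.eq_of_pairwise (fun a b _ _ h1 h2 => Nat.le_antisymm h1 h2)
    (hp.imp le_of_lt) ((pairwise_lt_range'' a n).imp le_of_lt) hperm

theorem headD_range' (a n d : Nat) (h : 0 < n) : (List.range' a n).headD d = a := by
  cases n with
  | zero => omega
  | succ m => simp [List.range'_succ]

theorem getLastD_range' (a n d : Nat) (h : 0 < n) : (List.range' a n).getLastD d = a + n - 1 := by
  cases n with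
  | zero => omega
  | succ m => rw [List.range'_1_concat, List.getLastD_concat]; omega

theorem min_spec (l : List Nat) (hne : l ≠ []) : l.min?.getD 0 ∈ l ∧ ∀ b ∈ l, l.min?.getD 0 ≤ b := by
  cases h : l.min? with
  | none => exact absurd (List.min?_eq_none_iff.mp h) hne
  | some a => simpa [h] using List.min?_eq_some_iff_subtype.mp h

theorem max_spec (l : List Nat) (hne : l ≠ []) : l.max?.getD 0 ∈ l ∧ ∀ b ∈ l, b ≤ l.max?.getD 0 := by
  cases h : l.max? with
  | none => exact absurd (List.max?_eq_none_iff.mp h) hne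
  | some a => simpa [h] using List.max?_eq_some_iff_subtype.mp h

theorem sum_filter_zero (l : List Nat) (p : Nat → Bool) (f : Nat → Nat)
    (h : ∀ c ∈ l, p c = false → f c = 0) :
    ((l.filter p).map f).sum = (l.map f).sum := by
  induction l with
  | nil => rfl
  | cons c t ih =>
    simp only [List.filter_cons, List.map_cons, List.sum_cons]
    by_cases hc : p c
    · simp only [hc, if_pos, List.map_cons, List.sum_cons]
      rw [ih (fun x hx => h x (by simp [hx]))]
    · rw [if_neg (by simp [hc]), ih (fun x hx => h x (by simp [hx])),
        h c (by simp) (by simpa using hc)]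
      omega

theorem all_eq_of_sum (l : List Nat) (h : Nat) (hb : ∀ x ∈ l, x ≤ h)
    (hs : l.sum = l.length * h) : ∀ x ∈ l, x = h := by
  induction l with
  | nil => simp
  | cons c t ih =>
    simp only [List.sum_cons, List.length_cons] at hs
    have hc : c ≤ h := hb c (by simp)
    have hsum : t.sum ≤ t.length * h := by
      calc t.sum ≤ t.length • h := List.sum_le_card_nsmul t h (fun x hx => hb x (by simp [hx]))
        _ = t.length * h := smul_eq_mul ..
    have hexp : (t.length + 1) * h = t.length * h + h := by ring
    rw [hexp] at hs
    have hc' : c = h := by omega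
    intro x hx
    rcases List.mem_cons.mp hx with rfl | hx'
    · exact hc'
    · exact ih (fun y hy => hb y (by simp [hy])) (by omega) x hx'

theorem hit_nil_iff (g : List (List Int)) : hitL g = [] ↔ M g = [] := by
  constructor
  · intro h
    rw [List.eq_nil_iff_forall_not_mem]
    intro p hp
    rcases (mem_M g p).mp hp with ⟨h1, h2⟩
    have : p.2 ∈ hitL g := (mem_hitL g p.2).mpr ⟨h1, by
      intro hemp; rw [hemp] at h2; simp at h2⟩
    simp [h] at this
  · intro h
    rw [List.eq_nil_iff_forall_not_mem]
    intro c hc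
    rcases (mem_hitL g c).mp hc with ⟨h1, h2⟩
    rcases List.exists_mem_of_ne_nil _ h2 with ⟨r, hr⟩
    have : (r, c) ∈ M g := (mem_M g (r, c)).mpr ⟨h1, hr⟩
    simp [h] at this

theorem len_M (g : List (List Int)) :
    (M g).length = ((Cl g).map (fun c => (misB g c).length)).sum := by
  unfold M
  rw [List.length_flatMap]
  have e : (List.range (ghalf g)).map (fun cc => gcols g - 1 - cc) = (Cl g).reverse := by
    apply List.ext_getElem
    · simp [Cl]
    · intro k h1 h2
      simp only [List.length_map, List.length_range] at h1
      have hh : ghalf g ≤ gcols g := by unfold ghalf; omega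
      simp only [List.getElem_map, List.getElem_range, List.getElem_reverse, Cl,
        List.length_range', List.getElem_range']
      omega
  have e2 : ((List.range (ghalf g)).map fun cc => ((misB g (gcols g - 1 - cc)).map (fun r => (r, gcols g - 1 - cc))).length)
      = ((Cl g).reverse.map (fun c => (misB g c).length)) := by
    rw [← e, List.map_map]
    simp [Function.comp, List.length_map]
  rw [e2, List.map_reverse, List.sum_reverse]


theorem len_M_hit (g : List (List Int)) :
    (M g).length = ((hitL g).map (fun c => (misB g c).length)).sum := by
  rw [len_M]
  exact (sum_filter_zero (Cl g) _ _ (fun c _ hc => by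
    simp only [Bool.not_eq_false'] at hc
    simp [List.isEmpty_iff.mp hc])).symm

theorem M_bounds (g : List (List Int)) :
    ∀ p ∈ M g, Amr g ≤ p.1 ∧ p.1 ≤ AMr g ∧ Amc g ≤ p.2 ∧ p.2 ≤ AMc g := by
  intro p hp
  have hf : ((M g).map Prod.fst) ≠ [] := by
    simp only [ne_eq, List.map_eq_nil_iff]; intro h; rw [h] at hp; simp at hp
  have hs : ((M g).map Prod.snd) ≠ [] := by
    simp only [ne_eq, List.map_eq_nil_iff]; intro h; rw [h] at hp; simp at hp
  exact ⟨(min_spec _ hf).2 _ (List.mem_map_of_mem hp),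
    (max_spec _ hf).2 _ (List.mem_map_of_mem hp),
    (min_spec _ hs).2 _ (List.mem_map_of_mem hp),
    (max_spec _ hs).2 _ (List.mem_map_of_mem hp)⟩

theorem forward (g : List (List Int)) (hcnt : (M g).length = Ah g * Aw g) :
    hitL g = List.range' (Amc g) (Aw g) ∧ ∀ c ∈ hitL g, misB g c = List.range' (Amr g) (Ah g) := by
  have hsubcol : ∀ c ∈ hitL g, ∀ r ∈ misB g c, r ∈ List.range' (Amr g) (Ah g) := by
    intro c hc r hr
    have h := M_bounds g (r, c) ((mem_M g (r, c)).mpr ⟨((mem_hitL g c).mp hc).1, hr⟩)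
    rw [List.mem_range'_1]; unfold Ah; simp only at h; omega
  have hsubhit : ∀ c ∈ hitL g, c ∈ List.range' (Amc g) (Aw g) := by
    intro c hc
    obtain ⟨h1, h2⟩ := (mem_hitL g c).mp hc
    obtain ⟨r, hr⟩ := List.exists_mem_of_ne_nil _ h2
    have h := M_bounds g (r, c) ((mem_M g (r, c)).mpr ⟨h1, hr⟩)
    rw [List.mem_range'_1]; unfold Aw; simp only at h; omega
  have hlencol : ∀ c ∈ hitL g, (misB g c).length ≤ Ah g := by
    intro c hc
    have h := ((nodup_of_pairwise_lt _ (pairwise_misB g c)).subperm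
      (fun x hx => hsubcol c hc x hx)).length_le
    simpa [List.length_range'] using h
  have hlenhit : (hitL g).length ≤ Aw g := by
    have h := ((nodup_of_pairwise_lt _ (pairwise_hitL g)).subperm hsubhit).length_le
    simpa [List.length_range'] using h
  have hsum : ((hitL g).map (fun c => (misB g c).length)).sum = Ah g * Aw g := by
    rw [← len_M_hit]; exact hcnt
  have hsumle : ((hitL g).map (fun c => (misB g c).length)).sum ≤ (hitL g).length * Ah g := by
    calc ((hitL g).map (fun c => (misB g c).length)).sum
        ≤ ((hitL g).map (fun c => (misB g c).length)).length • Ah g :=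
          List.sum_le_card_nsmul _ _ (by
            intro x hx; obtain ⟨c, hc, rfl⟩ := List.mem_map.mp hx; exact hlencol c hc)
      _ = (hitL g).length * Ah g := by rw [smul_eq_mul, List.length_map]
  have hAh : 0 < Ah g := by unfold Ah; omega
  have hlenhit' : Aw g ≤ (hitL g).length := by
    by_contra hlt
    push Not at hlt
    have h1 : (hitL g).length * Ah g < Aw g * Ah g := (Nat.mul_lt_mul_right hAh).mpr hlt
    have h2 : Aw g * Ah g = Ah g * Aw g := Nat.mul_comm _ _
    omega
  have hhitlen : (hitL g).length = Aw g := le_antisymm hlenhit hlenhit'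
  have hhit : hitL g = List.range' (Amc g) (Aw g) :=
    eq_range'_of_subset_len _ _ _ (pairwise_hitL g) hsubhit hhitlen
  have hall : ∀ x ∈ (hitL g).map (fun c => (misB g c).length), x = Ah g :=
    all_eq_of_sum _ _ (by
        intro x hx; obtain ⟨c, hc, rfl⟩ := List.mem_map.mp hx; exact hlencol c hc)
      (by rw [hsum, List.length_map, hhitlen]; ring)
  refine ⟨hhit, fun c hc => ?_⟩
  exact eq_range'_of_subset_len _ _ _ (pairwise_misB g c) (hsubcol c hc)
    (hall _ (List.mem_map_of_mem hc))

theorem backward (g : List (List Int)) (hne : hitL g ≠ [])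
    (h1 : hitL g = List.range' ((hitL g).headD 0) ((hitL g).getLastD 0 + 1 - (hitL g).headD 0))
    (h2 : misB g ((hitL g).headD 0) =
      List.range' ((misB g ((hitL g).headD 0)).headD 0)
        ((misB g ((hitL g).headD 0)).getLastD 0 + 1 - (misB g ((hitL g).headD 0)).headD 0))
    (h3 : ∀ c ∈ hitL g, misB g c = misB g ((hitL g).headD 0)) :
    Amc g = (hitL g).headD 0 ∧ AMc g = (hitL g).getLastD 0 ∧
    Amr g = (misB g ((hitL g).headD 0)).headD 0 ∧ AMr g = (misB g ((hitL g).headD 0)).getLastD 0 ∧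
    (M g).length = Ah g * Aw g := by
  set c0 := (hitL g).headD 0 with hc0
  set L := (hitL g).getLastD 0 with hLdef
  set rs0 := misB g c0 with hrs0def
  set r0 := rs0.headD 0 with hr0
  set R := rs0.getLastD 0 with hRdef
  set n := L + 1 - c0 with hndef
  set m := R + 1 - r0 with hmdef
  have hn : hitL g = List.range' c0 n := h1
  have npos : 0 < n := by
    rcases Nat.eq_zero_or_pos n with h0 | h; · rw [h0] at hn; simp at hn; exact absurd hn hne
    · exact h
  have hc0hit : c0 ∈ hitL g := by
    rw [hn, List.mem_range'_1]; omega
  have hrs0ne : rs0 ≠ [] := ((mem_hitL g c0).mp hc0hit).2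
  have hm : rs0 = List.range' r0 m := h2
  have mpos : 0 < m := by
    rcases Nat.eq_zero_or_pos m with h0 | h; · rw [h0] at hm; simp at hm; exact absurd hm hrs0ne
    · exact h
  have hLval : L = c0 + n - 1 := by rw [hLdef, hn, getLastD_range' _ _ _ npos]
  have hRval : R = r0 + m - 1 := by rw [hRdef, hm, getLastD_range' _ _ _ mpos]
  have hr0mem : r0 ∈ rs0 := by rw [hm, List.mem_range'_1]; omega
  have memM : ∀ p : Nat × Nat, p ∈ M g ↔ (p.2 ∈ hitL g ∧ p.1 ∈ rs0) := by
    intro p; rw [mem_M]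
    constructor
    · rintro ⟨hcl, hmis⟩
      have hne2 : misB g p.2 ≠ [] := by intro h; rw [h] at hmis; simp at hmis
      have hhit : p.2 ∈ hitL g := (mem_hitL _ _).mpr ⟨hcl, hne2⟩
      exact ⟨hhit, by rw [← h3 p.2 hhit]; exact hmis⟩
    · rintro ⟨hhit, hr⟩
      exact ⟨((mem_hitL _ _).mp hhit).1, by rw [h3 p.2 hhit]; exact hr⟩
  have hp0 : (r0, c0) ∈ M g := (memM (r0, c0)).mpr ⟨hc0hit, hr0mem⟩
  have hsndb : ∀ x ∈ (M g).map Prod.snd, c0 ≤ x ∧ x ≤ L := by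
    intro x hx
    obtain ⟨p, hp, rfl⟩ := List.mem_map.mp hx
    have := ((memM p).mp hp).1
    rw [hn, List.mem_range'_1] at this; omega
  have hfstb : ∀ x ∈ (M g).map Prod.fst, r0 ≤ x ∧ x ≤ R := by
    intro x hx
    obtain ⟨p, hp, rfl⟩ := List.mem_map.mp hx
    have := ((memM p).mp hp).2
    rw [hm, List.mem_range'_1] at this; omega
  have hLhit : L ∈ hitL g := by rw [hn, List.mem_range'_1]; omega
  have hRrs : R ∈ rs0 := by rw [hm, List.mem_range'_1]; omega
  have hAmc : Amc g = c0 := by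
    unfold Amc
    rw [List.min?_eq_some_iff_subtype.mpr
      ⟨List.mem_map.mpr ⟨(r0, c0), hp0, rfl⟩, fun b hb => (hsndb b hb).1⟩]
    rfl
  have hAMc : AMc g = L := by
    unfold AMc
    rw [List.max?_eq_some_iff_subtype.mpr
      ⟨List.mem_map.mpr ⟨(r0, L), (memM (r0, L)).mpr ⟨hLhit, hr0mem⟩, rfl⟩,
        fun b hb => (hsndb b hb).2⟩]
    rfl
  have hAmr : Amr g = r0 := by
    unfold Amr
    rw [List.min?_eq_some_iff_subtype.mpr
      ⟨List.mem_map.mpr ⟨(r0, c0), hp0, rfl⟩, fun b hb => (hfstb b hb).1⟩]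
    rfl
  have hAMr : AMr g = R := by
    unfold AMr
    rw [List.max?_eq_some_iff_subtype.mpr
      ⟨List.mem_map.mpr ⟨(R, c0), (memM (R, c0)).mpr ⟨hc0hit, hRrs⟩, rfl⟩,
        fun b hb => (hfstb b hb).2⟩]
    rfl
  have hcount : (M g).length = n * m := by
    rw [len_M_hit]
    have hmap : (hitL g).map (fun c => (misB g c).length) = (hitL g).map (fun _ => m) :=
      List.map_congr_left (fun c hc => by rw [h3 c hc, hm, List.length_range'])
    rw [hmap]
    have : ((hitL g).map (fun _ => m)).sum = (hitL g).length * m := by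
      induction hitL g with
      | nil => simp
      | cons a t ih => simp only [List.map_cons, List.sum_cons, List.length_cons, ih]; ring
    rw [this, hn, List.length_range']
  refine ⟨hAmc, hAMc, hAmr, hAMr, ?_⟩
  rw [hcount]
  unfold Ah Aw
  rw [hAmr, hAMr, hAmc, hAMc]
  have : R - r0 + 1 = m := by omega
  rw [this]
  have : L - c0 + 1 = n := by omega
  rw [this]
  ring

theorem headD_mem' (l : List Nat) (h : l ≠ []) : l.headD 0 ∈ l := by
  cases l with
  | nil => exact absurd rfl h
  | cons a t => simp

theorem set_len_one_iff (l : List Int) (a : Int) (ha : a ∈ l) :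
    (PySem.Set.ofList l).length = 1 ↔ ∀ x ∈ l, x = a := by
  have hnd : (PySem.Set.ofList l).Nodup := PySem.Set.nodup_ofList l
  constructor
  · intro h x hx
    cases hS : PySem.Set.ofList l with
    | nil => rw [hS] at h; simp at h
    | cons b t =>
      have ht : t = [] := by rw [hS] at h; simpa using h
      have hxb : x = b := by
        have := (PySem.Set.mem_ofList l x).mpr hx
        rw [hS, ht] at this; simpa using this
      have hab : a = b := by
        have := (PySem.Set.mem_ofList l a).mpr ha
        rw [hS, ht] at this; simpa using this
      rw [hxb, hab]
  · intro h
    cases hS : PySem.Set.ofList l with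
    | nil =>
      have := (PySem.Set.mem_ofList l a).mpr ha
      rw [hS] at this; simp at this
    | cons b t =>
      cases t with
      | nil => rfl
      | cons c u =>
        exfalso
        have hb : b = a := h b ((PySem.Set.mem_ofList l b).mp (by rw [hS]; simp))
        have hc : c = a := h c ((PySem.Set.mem_ofList l c).mp (by rw [hS]; simp))
        rw [hS] at hnd
        simp [hb, hc] at hnd

theorem color_iff (g : List (List Int)) (hh : hitL g ≠ []) :
    ((PySem.Set.ofList ((M g).map (fun p => pvGrid g p.1 p.2))).length = 1)
    ↔ (((hitL g).zip ((hitL g).map (misB g))).any (fun p =>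
        p.2.any (fun r => pvGrid g r p.1 !=
          pvGrid g ((misB g ((hitL g).headD 0)).headD 0) ((hitL g).headD 0))) = false) := by
  have hc0 : (hitL g).headD 0 ∈ hitL g := headD_mem' _ hh
  have hne0 : misB g ((hitL g).headD 0) ≠ [] := ((mem_hitL g _).mp hc0).2
  have hr0 : (misB g ((hitL g).headD 0)).headD 0 ∈ misB g ((hitL g).headD 0) := headD_mem' _ hne0
  have hp0 : ((misB g ((hitL g).headD 0)).headD 0, (hitL g).headD 0) ∈ M g :=
    (mem_M g _).mpr ⟨((mem_hitL g _).mp hc0).1, hr0⟩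
  rw [set_len_one_iff _ _ (List.mem_map.mpr ⟨_, hp0, rfl⟩)]
  rw [← List.map_prod_left_eq_zip]
  constructor
  · intro hA
    rw [List.any_eq_false]
    intro p hp
    obtain ⟨c, hc, rfl⟩ := List.mem_map.mp hp
    rw [Bool.not_eq_true, List.any_eq_false]
    intro r hr
    rw [Bool.not_eq_true, bne_eq_false_iff_eq]
    exact hA _ (List.mem_map.mpr ⟨(r, c), (mem_M g _).mpr ⟨((mem_hitL g c).mp hc).1, hr⟩, rfl⟩)
  · intro hB x hx
    obtain ⟨p, hp, rfl⟩ := List.mem_map.mp hx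
    obtain ⟨hcl, hmis⟩ := (mem_M g p).mp hp
    have hhit : p.2 ∈ hitL g := (mem_hitL g p.2).mpr ⟨hcl, List.ne_nil_of_mem hmis⟩
    have h1 := List.any_eq_false.mp hB _ (List.mem_map.mpr ⟨p.2, hhit, rfl⟩)
    rw [Bool.not_eq_true] at h1
    have h2 := List.any_eq_false.mp h1 _ hmis
    rw [Bool.not_eq_true, bne_eq_false_iff_eq] at h2
    exact h2

theorem rev_map_range (f : Nat → Int) (w : Nat) :
    (List.map f (List.range w)).reverse = List.map (fun j => f (w - 1 - j)) (List.range w) := by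
  apply List.ext_getElem
  · simp
  · intro k h1 h2; simp

theorem getLastD_mem' (l : List Nat) (h : l ≠ []) : l.getLastD 0 ∈ l := by
  rw [List.getLastD_eq_getLast?, List.getLast?_eq_some_getLast h]
  exact List.getLast_mem h

theorem hmaphead_eq (g : List (List Int)) (hh : hitL g ≠ []) :
    ((hitL g).map (misB g)).headD [] = misB g ((hitL g).headD 0) := by
  cases h : hitL g with
  | nil => exact absurd h hh
  | cons a t => simp

theorem main_eq (g : List (List Int)) :
    check_horizontal_painted_right g = check_horizontal_painted_right_alt g := by
  simp only [check_horizontal_painted_right, check_horizontal_painted_right_alt]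
  rw [A_mism, B_acc]
  dsimp only
  by_cases hM : M g = []
  · have hh : hitL g = [] := (hit_nil_iff g).mpr hM
    simp [hM, hh]
  · have hh : hitL g ≠ [] := fun h => hM ((hit_nil_iff g).mp h)
    rw [if_neg (show ¬((M g).isEmpty = true) from by simpa [List.isEmpty_iff] using hM),
        if_neg (show ¬((hitL g).isEmpty = true) from by simpa [List.isEmpty_iff] using hh),
        hmaphead_eq g hh]
    by_cases hcol : (PySem.Set.ofList ((M g).map (fun p => pvGrid g p.1 p.2))).length = 1
    · rw [if_neg (show ¬((PySem.Set.ofList ((M g).map (fun p => pvGrid g p.1 p.2))).length ≠ 1)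
            from not_not.mpr hcol),
          if_neg (show ¬((((hitL g).zip ((hitL g).map (misB g))).any (fun p =>
              p.2.any (fun r => pvGrid g r p.1 !=
                pvGrid g ((misB g ((hitL g).headD 0)).headD 0) ((hitL g).headD 0)))) = true)
            from by rw [(color_iff g hh).mp hcol]; simp)]
      -- fold the four extremal values
      rw [show (((M g).map Prod.fst).min?).getD 0 = Amr g from rfl,
          show (((M g).map Prod.fst).max?).getD 0 = AMr g from rfl,
          show (((M g).map Prod.snd).min?).getD 0 = Amc g from rfl,
          show (((M g).map Prod.snd).max?).getD 0 = AMc g from rfl]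
      have hforw : (M g).length = (AMr g - Amr g + 1) * (AMc g - Amc g + 1) →
          hitL g = List.range' (Amc g) (AMc g - Amc g + 1) ∧
          ∀ c ∈ hitL g, misB g c = List.range' (Amr g) (AMr g - Amr g + 1) := by
        intro hcnt
        have h := forward g (by unfold Ah Aw; exact hcnt)
        unfold Ah Aw at h
        exact h
      by_cases hg1 : hitL g = List.range' ((hitL g).headD 0) ((hitL g).getLastD 0 + 1 - (hitL g).headD 0)
      · by_cases hg2 : misB g ((hitL g).headD 0) = List.range' ((misB g ((hitL g).headD 0)).headD 0)
            ((misB g ((hitL g).headD 0)).getLastD 0 + 1 - (misB g ((hitL g).headD 0)).headD 0)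
        · by_cases hg3 : ∀ c ∈ hitL g, misB g c = misB g ((hitL g).headD 0)
          · -- all geometric checks pass: both programs return the block
            obtain ⟨hAmc, hAMc, hAmr, hAMr, hcount⟩ := backward g hh hg1 hg2 hg3
            unfold Ah Aw at hcount
            rw [if_neg (show ¬((M g).length ≠ (AMr g - Amr g + 1) * (AMc g - Amc g + 1))
                  from not_not.mpr hcount),
                if_neg (not_not.mpr hg1), if_neg (not_not.mpr hg2),
                if_neg (show ¬((((hitL g).map (misB g)).any
                      (fun rs => rs != misB g ((hitL g).headD 0))) = true) from by
                  rw [Bool.not_eq_true, List.any_eq_false]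
                  intro rs hrs
                  obtain ⟨c, hc, rfl⟩ := List.mem_map.mp hrs
                  rw [Bool.not_eq_true, bne_eq_false_iff_eq]
                  exact hg3 c hc)]
            -- both outputs are the same mirrored block
            congr 1
            rw [hg2, hAmc, hAMc, hAmr, hAMr]
            have hc0hit : (hitL g).headD 0 ∈ hitL g := headD_mem' _ hh
            have hc0le : (hitL g).headD 0 ≤ (hitL g).getLastD 0 := by
              have h1 : (hitL g).headD 0 ∈ List.range' ((hitL g).headD 0)
                  ((hitL g).getLastD 0 + 1 - (hitL g).headD 0) := by rw [← hg1]; exact hc0hit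
              rw [List.mem_range'_1] at h1
              omega
            have hLmem : (hitL g).getLastD 0 ∈ hitL g := getLastD_mem' _ hh
            have hLCl : (hitL g).getLastD 0 ∈ Cl g := ((mem_hitL g _).mp hLmem).1
            have hLlt : (hitL g).getLastD 0 < (g.getD 0 []).length := by
              unfold Cl ghalf gcols at hLCl
              rw [List.mem_range'_1] at hLCl
              omega
            have hr0le : (misB g ((hitL g).headD 0)).headD 0 ≤ (misB g ((hitL g).headD 0)).getLastD 0 := by
              have hne0 : misB g ((hitL g).headD 0) ≠ [] := ((mem_hitL g _).mp hc0hit).2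
              have h1 : (misB g ((hitL g).headD 0)).headD 0 ∈
                  List.range' ((misB g ((hitL g).headD 0)).headD 0)
                    ((misB g ((hitL g).headD 0)).getLastD 0 + 1 - (misB g ((hitL g).headD 0)).headD 0) := by
                rw [← hg2]; exact headD_mem' _ hne0
              rw [List.mem_range'_1] at h1
              omega
            simp only [show (misB g ((hitL g).headD 0)).getLastD 0 + 1 - (misB g ((hitL g).headD 0)).headD 0
                  = (misB g ((hitL g).headD 0)).getLastD 0 - (misB g ((hitL g).headD 0)).headD 0 + 1 from by omega,
                show (hitL g).getLastD 0 + 1 - (hitL g).headD 0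
                  = (hitL g).getLastD 0 - (hitL g).headD 0 + 1 from by omega,
                List.range'_eq_map_range, List.map_map]
            apply List.map_congr_left
            intro i hi
            rw [rev_map_range]
            apply List.map_congr_left
            intro j hj
            simp only [Function.comp, List.mem_range] at hj ⊢
            congr 1
            omega
          · -- column row-lists differ: B fails its uniformity check, A fails the count
            rw [if_pos (show (M g).length ≠ (AMr g - Amr g + 1) * (AMc g - Amc g + 1) from by
                  intro hcnt
                  obtain ⟨hh1, hh2⟩ := hforw hcnt
                  exact hg3 (fun c hc => by rw [hh2 c hc, hh2 _ (headD_mem' _ hh)])),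
                if_neg (not_not.mpr hg1), if_neg (not_not.mpr hg2),
                if_pos (show (((hitL g).map (misB g)).any
                      (fun rs => rs != misB g ((hitL g).headD 0))) = true from by
                  rw [List.any_eq_true]
                  have hex : ∃ c ∈ hitL g, misB g c ≠ misB g ((hitL g).headD 0) := by
                    by_contra hall
                    push Not at hall
                    exact hg3 hall
                  obtain ⟨c, hc, hcne⟩ := hex
                  exact ⟨misB g c, List.mem_map.mpr ⟨c, hc, rfl⟩, by simpa using hcne⟩)]
        · -- first column's rows not contiguous: B fails, A fails the count
          rw [if_pos (show (M g).length ≠ (AMr g - Amr g + 1) * (AMc g - Amc g + 1) from by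
                intro hcnt
                obtain ⟨hh1, hh2⟩ := hforw hcnt
                apply hg2
                have hAhpos : 0 < AMr g - Amr g + 1 := by omega
                have e := hh2 _ (headD_mem' _ hh)
                rw [e, headD_range' _ _ _ hAhpos, getLastD_range' _ _ _ hAhpos]
                congr 1
                omega),
              if_neg (not_not.mpr hg1), if_pos hg2]
      · -- hit columns not contiguous: B fails, A fails the count
        rw [if_pos (show (M g).length ≠ (AMr g - Amr g + 1) * (AMc g - Amc g + 1) from by
              intro hcnt
              obtain ⟨hh1, hh2⟩ := hforw hcnt
              apply hg1
              have hAwpos : 0 < AMc g - Amc g + 1 := by omega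
              rw [hh1, headD_range' _ _ _ hAwpos, getLastD_range' _ _ _ hAwpos]
              congr 1
              omega),
            if_pos hg1]
    · rw [if_pos (show (PySem.Set.ofList ((M g).map (fun p => pvGrid g p.1 p.2))).length ≠ 1 from hcol),
          if_pos (show (((hitL g).zip ((hitL g).map (misB g))).any (fun p =>
              p.2.any (fun r => pvGrid g r p.1 !=
                pvGrid g ((misB g ((hitL g).headD 0)).headD 0) ((hitL g).headD 0)))) = true from by
            rcases Bool.eq_false_or_eq_true (((hitL g).zip ((hitL g).map (misB g))).any (fun p =>
              p.2.any (fun r => pvGrid g r p.1 !=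
                pvGrid g ((misB g ((hitL g).headD 0)).headD 0) ((hitL g).headD 0)))) with hf | ht
            · exact hf
            · exact absurd ((color_iff g hh).mpr ht) hcol)]

-- ===== VERDICT (by name: the statement is the Claim_ definition above) =====
theorem check_horizontal_painted_right_spec : Claim_equal_check_horizontal_painted_right := by
  intro grid _ _
  unfold Spec_check_horizontal_painted_right
  exact main_eq grid
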